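-- pv_equiv track=rewrite | github.com/Arsen1302/Code-copy-detector | TestData/solutions/problem_858_3.py | solution_858_3
-- ===== SOURCE A (Python) =====
-- from typing import List
--
-- def solution_858_3(arr: List[int], start: int) -> bool:
--     vis = [0]*len(arr)
--     pos = [start]
--     while pos:
--         nextPos = []
--         while pos:
--             x = pos.pop()
--             if arr[x] == 0: return True
--             vis[x] = 1
--             for y in (x-arr[x], x+arr[x]):
--                 if 0 <= y < len(arr) and not vis[y]: nextPos.append(y)
--         pos = nextPos
--     return False
-- ===== SOURCE B (Python) =====
-- def solution_858_3(arr, start):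
--     n = len(arr)
--     vis = [0] * n
--     stack = [start]
--     while stack:
--         x = stack.pop()
--         if arr[x] == 0:
--             return True
--         if vis[x]:
--             continue
--         vis[x] = 1
--         for y in (x - arr[x], x + arr[x]):
--             if 0 <= y < n:
--                 stack.append(y)
--     return False
-- ===== Notes on version B (the rewrite author's own statement) =====
-- stated objective: alternative
-- what changed: A runs a two-list level-by-level BFS that filters candidates by the visited array before appending them to the next level; B is a single-stack DFS-style worklist that pushes every in-bounds jump target unconditionally and defers the visited check to pop time, so the nested level loops and the pre-append visited filter disappear.
import Mathlib
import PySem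

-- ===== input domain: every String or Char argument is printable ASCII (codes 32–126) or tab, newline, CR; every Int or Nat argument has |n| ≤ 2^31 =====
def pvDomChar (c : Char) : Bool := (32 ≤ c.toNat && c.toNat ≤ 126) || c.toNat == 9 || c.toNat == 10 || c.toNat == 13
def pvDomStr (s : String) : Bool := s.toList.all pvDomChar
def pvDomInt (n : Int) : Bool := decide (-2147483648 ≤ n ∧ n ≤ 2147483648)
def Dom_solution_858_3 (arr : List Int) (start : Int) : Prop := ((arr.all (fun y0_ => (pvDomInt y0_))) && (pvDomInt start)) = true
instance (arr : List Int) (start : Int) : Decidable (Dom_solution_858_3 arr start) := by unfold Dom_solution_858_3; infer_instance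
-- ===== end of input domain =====

-- B replaces A's two-list level BFS by a single-stack worklist that pushes every in-bounds
-- jump target and checks the visited array at pop time (objective: alternative, same cost).

-- ===== PORT A =====
-- helpers for the termination measure of A's outer `while pos:` loop
def pvZn (vis : List Int) : Nat := vis.countP (fun t => !(t == 1))

def pvUnv (vis : List Int) (x : Int) : Bool :=
  match PySem.List.pyGet? vis x with
  | some v => !(v == 1)
  | none => false

def pvFlagA (pos vis : List Int) : Nat :=
  if pos.isEmpty then 0 else if pos.any (fun x => pvUnv vis x) then 0 else 1

-- normalized index of a Python list access (used by the termination arguments and proofs)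
def nIdxN (n : Nat) (i : Int) : Nat := if 0 ≤ i then i.toNat else n - (-i).toNat

theorem pyIdx_inRange {n : Nat} {i : Int} (h : -(n : Int) ≤ i) (h2 : i < n) :
    PySem.List.pyIdx? n i = some (nIdxN n i) := by
  simp only [PySem.List.pyIdx?, nIdxN]
  split_ifs <;> first | rfl | omega

theorem nIdxN_lt {n : Nat} {i : Int} (_h : -(n : Int) ≤ i) (h2 : i < n) (hn : 0 < n) :
    nIdxN n i < n := by
  simp only [nIdxN]; split_ifs <;> omega

theorem pyGet?_inRange {α : Type} {l : List α} {i : Int}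
    (h : -(l.length : Int) ≤ i) (h2 : i < l.length) :
    PySem.List.pyGet? l i = l[nIdxN l.length i]? := by
  simp [PySem.List.pyGet?, pyIdx_inRange h h2]

-- inner `while pos: x = pos.pop()` — pops from the END of pos, so it walks pos.reverse;
-- `.inl b` = the function returned from inside the loop, `.inr (nextPos, vis)` = loop finished
def innerA (arr : List Int) (rev : List Int) (vis : List Int) (next : List Int) :
    Sum Bool (List Int × List Int) :=
  match rev with
  | [] => .inr (next, vis)
  | x :: rest =>
    match PySem.List.pyGet? arr x with
    | none => .inl false  -- Python raises IndexError on arr[x]; excluded by Pre_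
    | some v =>
      if v = 0 then .inl true
      else
        let vis' := PySem.List.pySetD vis x 1   -- vis[x] = 1 (index in range whenever reached)
        innerA arr rest vis'
          (next ++ [x - v, x + v].filter
            (fun y => decide (0 ≤ y) && decide (y < (arr.length : Int)) &&
                      (PySem.List.pyGetD vis' y 0 == 0)))

-- facts about innerA used by the termination proof of outerA
theorem pvZn_set_lt (l : List Int) (k : Nat) (hk : k < l.length) (h : l[k] ≠ 1) :
    pvZn (l.set k 1) < pvZn l := by
  induction l generalizing k with
  | nil => simp at hk
  | cons a t ih =>
    cases k with
    | zero =>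
      simp only [List.getElem_cons_zero] at h
      simp [pvZn, h]
    | succ k =>
      simp only [List.length_cons, Nat.succ_lt_succ_iff] at hk
      simp only [List.getElem_cons_succ] at h
      have := ih k hk h
      simp only [List.set_cons_succ, pvZn, List.countP_cons] at *
      omega

theorem pySetD_one_cases (l : List Int) (x : Int) :
    PySem.List.pySetD l x 1 = l ∨ pvZn (PySem.List.pySetD l x 1) < pvZn l := by
  unfold PySem.List.pySetD PySem.List.pySet?
  cases hk : PySem.List.pyIdx? l.length x with
  | none => simp
  | some k =>
    simp only [Option.map_some, Option.getD_some]
    have hklt : k < l.length := by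
      unfold PySem.List.pyIdx? at hk
      split_ifs at hk <;> simp_all <;> omega
    by_cases h1 : l[k] = 1
    · left
      apply List.ext_getElem (by simp)
      intro i hi _
      rw [List.getElem_set]
      split <;> simp_all
    · right; exact pvZn_set_lt l k hklt h1

theorem pvUnv_mark_lt (vis : List Int) (x : Int) (h : pvUnv vis x = true) :
    pvZn (PySem.List.pySetD vis x 1) < pvZn vis := by
  unfold pvUnv at h
  cases hg : PySem.List.pyGet? vis x with
  | none => rw [hg] at h; simp at h
  | some v =>
    rw [hg] at h
    simp only [Bool.not_eq_eq_eq_not, Bool.not_true, beq_eq_false_iff_ne, ne_eq] at h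
    unfold PySem.List.pyGet? at hg
    cases hk : PySem.List.pyIdx? vis.length x with
    | none => rw [hk] at hg; simp at hg
    | some k =>
      rw [hk] at hg
      simp only [Option.bind_some] at hg
      obtain ⟨hklt, hke⟩ := List.getElem?_eq_some_iff.mp hg
      have hset : PySem.List.pySetD vis x 1 = vis.set k 1 := by
        simp [PySem.List.pySetD, PySem.List.pySet?, hk]
      rw [hset]
      exact pvZn_set_lt vis k hklt (by rw [hke]; exact h)

theorem pvZn_pySetD_le (l : List Int) (x : Int) : pvZn (PySem.List.pySetD l x 1) ≤ pvZn l := by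
  rcases pySetD_one_cases l x with h | h
  · rw [h]
  · exact Nat.le_of_lt h

theorem innerA_len (arr : List Int) : ∀ rev vis next next' vis',
    innerA arr rev vis next = .inr (next', vis') → vis'.length = vis.length := by
  intro rev
  induction rev with
  | nil =>
    intro vis next next' vis' h
    simp only [innerA, Sum.inr.injEq, Prod.mk.injEq] at h
    rw [h.2]
  | cons x rest ih =>
    intro vis next next' vis' h
    rw [innerA] at h
    cases hg : PySem.List.pyGet? arr x with
    | none => rw [hg] at h; simp at h
    | some v =>
      rw [hg] at h
      by_cases hv : v = 0
      · simp [hv] at h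
      · simp only [if_neg hv] at h
        have := ih _ _ _ _ h
        rwa [PySem.List.length_pySetD] at this

theorem innerA_zn (arr : List Int) : ∀ rev vis next next' vis',
    innerA arr rev vis next = .inr (next', vis') → pvZn vis' ≤ pvZn vis := by
  intro rev
  induction rev with
  | nil =>
    intro vis next next' vis' h
    simp only [innerA, Sum.inr.injEq, Prod.mk.injEq] at h
    rw [h.2]
  | cons x rest ih =>
    intro vis next next' vis' h
    rw [innerA] at h
    cases hg : PySem.List.pyGet? arr x with
    | none => rw [hg] at h; simp at h
    | some v =>
      rw [hg] at h
      by_cases hv : v = 0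
      · simp [hv] at h
      · simp only [if_neg hv] at h
        exact le_trans (ih _ _ _ _ h) (pvZn_pySetD_le vis x)

theorem innerA_eq_or_lt (arr : List Int) : ∀ rev vis next next' vis',
    innerA arr rev vis next = .inr (next', vis') → vis' = vis ∨ pvZn vis' < pvZn vis := by
  intro rev
  induction rev with
  | nil =>
    intro vis next next' vis' h
    simp only [innerA, Sum.inr.injEq, Prod.mk.injEq] at h
    exact Or.inl h.2.symm
  | cons x rest ih =>
    intro vis next next' vis' h
    rw [innerA] at h
    cases hg : PySem.List.pyGet? arr x with
    | none => rw [hg] at h; simp at h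
    | some v =>
      rw [hg] at h
      by_cases hv : v = 0
      · simp [hv] at h
      · simp only [if_neg hv] at h
        rcases pySetD_one_cases vis x with hc | hc
        · rw [hc] at h; exact ih _ _ _ _ h
        · rcases ih _ _ _ _ h with h1 | h1
          · rw [h1]; exact Or.inr hc
          · exact Or.inr (lt_trans h1 hc)

theorem innerA_dec (arr : List Int) : ∀ rev vis next next' vis',
    innerA arr rev vis next = .inr (next', vis') →
    (∃ x ∈ rev, pvUnv vis x = true) → pvZn vis' < pvZn vis := by
  intro rev
  induction rev with
  | nil => intro vis next next' vis' _ hex; simp at hex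
  | cons x rest ih =>
    intro vis next next' vis' h hex
    rw [innerA] at h
    cases hg : PySem.List.pyGet? arr x with
    | none => rw [hg] at h; simp at h
    | some v =>
      rw [hg] at h
      by_cases hv : v = 0
      · simp [hv] at h
      · simp only [if_neg hv] at h
        rcases hex with ⟨z, hz, hunv⟩
        rcases List.mem_cons.mp hz with rfl | hz
        · exact lt_of_le_of_lt (innerA_zn arr _ _ _ _ _ h) (pvUnv_mark_lt vis z hunv)
        · rcases pySetD_one_cases vis x with hc | hc
          · rw [hc] at h; exact ih _ _ _ _ h ⟨z, hz, hunv⟩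
          · exact lt_of_le_of_lt (innerA_zn arr _ _ _ _ _ h) hc

theorem innerA_stall (arr : List Int) : ∀ rev vis next next' vis',
    vis.length = arr.length →
    innerA arr rev vis next = .inr (next', vis') → vis' = vis →
    ∀ y ∈ next', y ∈ next ∨ pvUnv vis y = true := by
  intro rev
  induction rev with
  | nil =>
    intro vis next next' vis' _ h _ y hy
    simp only [innerA, Sum.inr.injEq, Prod.mk.injEq] at h
    rw [h.1]; exact Or.inl hy
  | cons x rest ih =>
    intro vis next next' vis' hlen h hveq y hy
    rw [innerA] at h
    cases hg : PySem.List.pyGet? arr x with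
    | none => rw [hg] at h; simp at h
    | some v =>
      rw [hg] at h
      by_cases hv : v = 0
      · simp [hv] at h
      · simp only [if_neg hv] at h
        have hc : PySem.List.pySetD vis x 1 = vis := by
          rcases pySetD_one_cases vis x with hc | hc
          · exact hc
          · exfalso
            have := innerA_zn arr _ _ _ _ _ h
            rw [hveq] at this
            omega
        rw [hc] at h
        rcases ih _ _ _ _ hlen h hveq y hy with hy2 | hy2
        · -- y came from next ++ filtered: split
          rcases List.mem_append.mp hy2 with hy3 | hy3
          · exact Or.inl hy3
          · right
            have hcond := (List.mem_filter.mp hy3).2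
            simp only [Bool.and_eq_true, decide_eq_true_eq, beq_iff_eq] at hcond
            obtain ⟨⟨hy0, hyl⟩, hyd⟩ := hcond
            have hyl' : y < (vis.length : Int) := by rw [hlen]; exact hyl
            have hget : PySem.List.pyGet? vis y = vis[nIdxN vis.length y]? :=
              pyGet?_inRange (by omega) hyl'
            have hlt : nIdxN vis.length y < vis.length := nIdxN_lt (by omega) hyl' (by
              have : (0:Int) ≤ y := hy0
              omega)
            unfold pvUnv
            rw [hget, List.getElem?_eq_getElem hlt]
            have : vis[nIdxN vis.length y] = 0 := by
              unfold PySem.List.pyGetD at hyd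
              rw [hget, List.getElem?_eq_getElem hlt] at hyd
              simpa using hyd
            rw [this]
            rfl
        · exact Or.inr hy2

-- outer `while pos:` loop of A (vis carries its length to make the loop total)
def outerA (arr : List Int) (pos : List Int) (vis : {v : List Int // v.length = arr.length}) :
    Bool :=
  if hpos : pos.isEmpty then false
  else
    match h : innerA arr pos.reverse vis.1 [] with
    | .inl b => b
    | .inr (next, vis') =>
      outerA arr next ⟨vis', by
        rw [innerA_len arr pos.reverse vis.1 [] next vis' h]; exact vis.2⟩
termination_by 2 * pvZn vis.1 + pvFlagA pos vis.1
decreasing_by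
  by_cases hv : vis' = vis.1
  · have hflag1 : pvFlagA pos vis.1 = 1 := by
      unfold pvFlagA
      rw [if_neg (by simpa using hpos), if_neg]
      simp only [List.any_eq_true, not_exists, not_and]
      intro z hz hunv
      have := innerA_dec arr pos.reverse vis.1 [] next vis' h
        ⟨z, List.mem_reverse.mpr hz, hunv⟩
      rw [hv] at this; omega
    have hflag0 : pvFlagA next vis' = 0 := by
      unfold pvFlagA
      by_cases hne : next.isEmpty
      · rw [if_pos hne]
      · rw [if_neg hne, if_pos]
        have hnil : next ≠ [] := by simpa [List.isEmpty_iff] using hne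
        obtain ⟨y, hy⟩ := List.exists_mem_of_ne_nil next hnil
        have := innerA_stall arr pos.reverse vis.1 [] next vis' vis.2 h hv y hy
        simp only [List.not_mem_nil, false_or] at this
        rw [hv]
        exact List.any_eq_true.mpr ⟨y, hy, this⟩
    rw [hv] at hflag0
    rw [hv]
    omega
  · have hlt : pvZn vis' < pvZn vis.1 := by
      rcases innerA_eq_or_lt arr pos.reverse vis.1 [] next vis' h with h1 | h1
      · exact absurd h1 hv
      · exact h1
    have : pvFlagA next vis' ≤ 1 := by unfold pvFlagA; split_ifs <;> omega
    have : pvFlagA pos vis.1 ≤ 1 := by unfold pvFlagA; split_ifs <;> omega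
    omega

def solution_858_3 (arr : List Int) (start : Int) : Bool :=
  outerA arr [start] ⟨List.replicate arr.length 0, by simp⟩

-- ===== PORT B =====
-- single-stack worklist of B; pops from the end, pushes both in-bounds jump targets
def loopB (arr : List Int) (stack : List Int) (vis : {v : List Int // v.length = arr.length}) :
    Bool :=
  match hx : stack.getLast? with
  | none => false
  | some x =>
    match ha : PySem.List.pyGet? arr x with
    | none => false  -- Python raises IndexError on arr[x]; excluded by Pre_
    | some v =>
      if v = 0 then true
      else if hvz : PySem.List.pyGetD vis.1 x 0 ≠ 0 then
        loopB arr stack.dropLast vis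
      else
        loopB arr
          (stack.dropLast ++ [x - v, x + v].filter
            (fun y => decide (0 ≤ y) && decide (y < (arr.length : Int))))
          ⟨PySem.List.pySetD vis.1 x 1, by rw [PySem.List.length_pySetD]; exact vis.2⟩
termination_by stack.length + 2 * pvZn vis.1
decreasing_by
  · have hne : stack ≠ [] := by
      intro hnil; rw [hnil] at hx; simp at hx
    have := List.length_pos_of_ne_nil hne
    rw [List.length_dropLast]
    omega
  · have hne : stack ≠ [] := by
      intro hnil; rw [hnil] at hx; simp at hx
    have hsp := List.length_pos_of_ne_nil hne
    have hunv : pvUnv vis.1 x = true := by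
      have hg : PySem.List.pyGet? arr x = some v := ha
      have hinr : ¬ PySem.List.pyGet? arr x = none := by rw [hg]; simp
      rw [PySem.List.pyGet?_eq_none_iff] at hinr
      have hr : PySem.Raise.InRange arr.length x := not_not.mp hinr
      obtain ⟨hr1, hr2⟩ := hr
      have hr1' : -(vis.1.length : Int) ≤ x := by rw [vis.2]; exact hr1
      have hr2' : x < (vis.1.length : Int) := by rw [vis.2]; exact hr2
      have hgv : PySem.List.pyGet? vis.1 x = vis.1[nIdxN vis.1.length x]? :=
        pyGet?_inRange hr1' hr2'
      have hlt : nIdxN vis.1.length x < vis.1.length :=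
        nIdxN_lt hr1' hr2' (by omega)
      have h0 : PySem.List.pyGetD vis.1 x 0 = 0 := not_not.mp (by simpa using hvz)
      unfold pvUnv
      rw [hgv, List.getElem?_eq_getElem hlt]
      have : vis.1[nIdxN vis.1.length x] = 0 := by
        unfold PySem.List.pyGetD at h0
        rw [hgv, List.getElem?_eq_getElem hlt] at h0
        simpa using h0
      rw [this]; rfl
    have hdec := pvUnv_mark_lt vis.1 x hunv
    have hfl : (List.filter (fun y => decide (0 ≤ y) && decide (y < (arr.length : Int)))
        [x - v, x + v]).length ≤ 2 := List.length_filter_le _ _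
    rw [List.length_append, List.length_dropLast]
    omega

def solution_858_3_alt (arr : List Int) (start : Int) : Bool :=
  loopB arr [start] ⟨List.replicate arr.length 0, by simp⟩

-- ===== PRECONDITION & SPEC =====
-- Pre_ excludes exactly the inputs where A raises IndexError on arr[start]
-- (start out of range [-len(arr), len(arr)), which includes every start when arr = [])
def Pre_solution_858_3 (arr : List Int) (start : Int) : Prop :=
  -(arr.length : Int) ≤ start ∧ start < (arr.length : Int)
instance (arr : List Int) (start : Int) : Decidable (Pre_solution_858_3 arr start) := by
  unfold Pre_solution_858_3; infer_instance

def pvWitness_solution_858_3 : List Int × Int := ([1, 2, 0], 1)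

def Spec_solution_858_3 (arr : List Int) (start : Int) (out : Bool) : Prop :=
  out = solution_858_3_alt arr start
instance (arr : List Int) (start : Int) (out : Bool) : Decidable (Spec_solution_858_3 arr start out) := by
  unfold Spec_solution_858_3; infer_instance

-- ===== CLAIM (what is proved, stated in full; the proofs are below) =====
def Claim_equal_solution_858_3 : Prop := ∀ (arr : List Int) (start : Int), Dom_solution_858_3 arr start → Pre_solution_858_3 arr start → Spec_solution_858_3 arr start (solution_858_3 arr start)

-- ===== LEMMAS AND PROOFS =====

-- the common specification: the jump graph and reachability of a zero entry
def aF (arr : List Int) (x : Int) : Int := (PySem.List.pyGet? arr x).getD 0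

def nbF (arr : List Int) (x : Int) : List Int :=
  [x - aF arr x, x + aF arr x].filter
    (fun y => decide (0 ≤ y) && decide (y < (arr.length : Int)))

def tokP (arr : List Int) (start x : Int) : Prop :=
  x = start ∨ (0 ≤ x ∧ x < (arr.length : Int))

-- the wrap partner start + len of a negative start is never expanded (its class is
-- marked visited by the start itself before any append happens, in A and in B alike)
def okE (start : Int) (n : Nat) (x : Int) : Prop := ¬(start < 0 ∧ x = start + n)

def stepR (arr : List Int) (start x y : Int) : Prop :=
  okE start arr.length x ∧ y ∈ nbF arr x

def reachR (arr : List Int) (start z : Int) : Prop :=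
  Relation.ReflTransGen (stepR arr start) start z

def ansP (arr : List Int) (start : Int) : Prop :=
  ∃ z, reachR arr start z ∧ aF arr z = 0

def markedP (vis : List Int) (x : Int) : Prop := PySem.List.pyGetD vis x 0 ≠ 0

theorem pySetD_inRange {α : Type} {l : List α} {i : Int} (v : α)
    (h : -(l.length : Int) ≤ i) (h2 : i < l.length) :
    PySem.List.pySetD l i v = l.set (nIdxN l.length i) v := by
  simp [PySem.List.pySetD, PySem.List.pySet?, pyIdx_inRange h h2]

theorem pyIdx?_some {n k : Nat} {i : Int} (h : PySem.List.pyIdx? n i = some k) :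
    (-(n : Int) ≤ i ∧ i < n) ∧ k = nIdxN n i ∧ k < n := by
  simp only [PySem.List.pyIdx?, nIdxN] at *
  split_ifs at h <;> simp_all <;> omega

theorem pyGetD_wrap {α : Type} (l : List α) {i : Int} (d : α)
    (h : -(l.length : Int) ≤ i) (h2 : i < 0) :
    PySem.List.pyGetD l i d = PySem.List.pyGetD l (i + l.length) d := by
  unfold PySem.List.pyGetD
  rw [pyGet?_inRange h (by omega), pyGet?_inRange (by omega) (by omega)]
  have : nIdxN l.length i = nIdxN l.length (i + l.length) := by
    simp only [nIdxN]; split_ifs <;> omega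
  rw [this]

theorem mark_mono {vis : List Int} {j : Int} (x : Int) (h : markedP vis j) :
    markedP (PySem.List.pySetD vis x 1) j := by
  unfold markedP PySem.List.pyGetD PySem.List.pyGet? at *
  cases hk : PySem.List.pyIdx? vis.length x with
  | none => simp only [PySem.List.pySetD, PySem.List.pySet?, hk, Option.map_none,
      Option.getD_none]; exact h
  | some k =>
    have hset : PySem.List.pySetD vis x 1 = vis.set k 1 := by
      simp [PySem.List.pySetD, PySem.List.pySet?, hk]
    rw [hset, List.length_set]
    cases hj : PySem.List.pyIdx? vis.length j with
    | none => rw [hj] at h; simp at h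
    | some m =>
      rw [hj] at h
      simp only [Option.bind_some] at h ⊢
      rw [List.getElem?_set]
      split
      · have := (pyIdx?_some hk).2.2
        rw [if_pos this]
        simp
      · exact h

theorem mark_self {vis : List Int} {x : Int}
    (h : -(vis.length : Int) ≤ x) (h2 : x < vis.length) :
    markedP (PySem.List.pySetD vis x 1) x := by
  have hn : 0 < vis.length := by omega
  have hlt := nIdxN_lt h h2 hn
  unfold markedP PySem.List.pyGetD PySem.List.pyGet?
  rw [pySetD_inRange 1 h h2, List.length_set, pyIdx_inRange h h2]
  simp only [Option.bind_some]
  rw [List.getElem?_set_self hlt]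
  simp

theorem mark_rev {vis : List Int} {x j : Int}
    (h : markedP (PySem.List.pySetD vis x 1) j) :
    markedP vis j ∨
      (-(vis.length : Int) ≤ j ∧ j < vis.length ∧ -(vis.length : Int) ≤ x ∧ x < vis.length ∧
        nIdxN vis.length j = nIdxN vis.length x) := by
  unfold markedP PySem.List.pyGetD PySem.List.pyGet? at *
  cases hk : PySem.List.pyIdx? vis.length x with
  | none =>
    simp only [PySem.List.pySetD, PySem.List.pySet?, hk, Option.map_none,
      Option.getD_none] at h
    exact Or.inl h
  | some k =>
    have hset : PySem.List.pySetD vis x 1 = vis.set k 1 := by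
      simp [PySem.List.pySetD, PySem.List.pySet?, hk]
    rw [hset, List.length_set] at h
    cases hj : PySem.List.pyIdx? vis.length j with
    | none => rw [hj] at h; simp at h
    | some m =>
      rw [hj] at h
      simp only [Option.bind_some] at h ⊢
      rw [List.getElem?_set] at h
      by_cases hkm : k = m
      · right
        obtain ⟨⟨hx1, hx2⟩, hke, _⟩ := pyIdx?_some hk
        obtain ⟨⟨hj1, hj2⟩, hme, _⟩ := pyIdx?_some hj
        exact ⟨hj1, hj2, hx1, hx2, by rw [← hme, ← hke, hkm]⟩
      · rw [if_neg hkm] at h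
        exact Or.inl h

theorem marked_replicate {n : Nat} {x : Int} : ¬ markedP (List.replicate n 0) x := by
  unfold markedP PySem.List.pyGetD PySem.List.pyGet?
  cases hk : PySem.List.pyIdx? (List.replicate n (0 : Int)).length x with
  | none => simp
  | some k =>
    simp only [Option.bind_some, List.getElem?_replicate]
    split <;> simp

-- two tokens share a visited entry iff they are equal or are the {start, start+len} pair
theorem partner_cases {arr : List Int} {start x j : Int}
    (hs1 : -(arr.length : Int) ≤ start) (_hs2 : start < arr.length)
    (hx : tokP arr start x) (hj : tokP arr start j)
    (h : nIdxN arr.length j = nIdxN arr.length x) :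
    j = x ∨ (start < 0 ∧ ((j = start ∧ x = start + arr.length) ∨
                          (j = start + arr.length ∧ x = start))) := by
  simp only [nIdxN] at h
  rcases hx with hxE | ⟨hx1, hx2⟩ <;> rcases hj with hjE | ⟨hj1, hj2⟩ <;>
    split_ifs at h <;>
      first
        | exact Or.inl (by omega)
        | exact Or.inr ⟨by omega, Or.inl ⟨by omega, by omega⟩⟩
        | exact Or.inr ⟨by omega, Or.inr ⟨by omega, by omega⟩⟩

theorem tok_inRange {arr : List Int} {start x : Int}
    (hs1 : -(arr.length : Int) ≤ start) (hs2 : start < arr.length)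
    (hx : tokP arr start x) : -(arr.length : Int) ≤ x ∧ x < arr.length := by
  rcases hx with rfl | ⟨h1, h2⟩ <;> omega

theorem tok_get {arr : List Int} {start x : Int}
    (hs1 : -(arr.length : Int) ≤ start) (hs2 : start < arr.length)
    (hx : tokP arr start x) : PySem.List.pyGet? arr x = some (aF arr x) := by
  obtain ⟨h1, h2⟩ := tok_inRange hs1 hs2 hx
  have hn : 0 < arr.length := by omega
  have hlt := nIdxN_lt h1 h2 hn
  have hg := pyGet?_inRange h1 h2
  rw [List.getElem?_eq_getElem hlt] at hg
  rw [aF, hg]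
  rfl

theorem reach_tok {arr : List Int} {start z : Int} (h : reachR arr start z) :
    tokP arr start z := by
  induction h with
  | refl => exact Or.inl rfl
  | tail _ hstep _ =>
    have := hstep.2
    unfold nbF at this
    have hc := (List.mem_filter.mp this).2
    simp only [Bool.and_eq_true, decide_eq_true_eq] at hc
    exact Or.inr hc

-- a closed visited set with no zero refutes reachability of a zero
theorem aF_wrap {arr : List Int} {start : Int}
    (hs1 : -(arr.length : Int) ≤ start) (hs2 : start < 0) :
    aF arr (start + arr.length) = aF arr start :=
  (pyGetD_wrap arr 0 hs1 hs2).symm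

theorem closed_noAns {arr : List Int} {start : Int} (vis : List Int)
    (hs1 : -(arr.length : Int) ≤ start) (_hs2 : start < arr.length)
    (_hlen : vis.length = arr.length)
    (hm : markedP vis start) (ha : aF arr start ≠ 0)
    (hcl : ∀ z, tokP arr start z → markedP vis z → okE start arr.length z →
      aF arr z ≠ 0 ∧ ∀ y ∈ nbF arr z, markedP vis y) :
    ¬ ansP arr start := by
  have key : ∀ z, reachR arr start z → markedP vis z ∧ aF arr z ≠ 0 := by
    intro z hz
    induction hz with
    | refl => exact ⟨hm, ha⟩
    | @tail b c hr hstep ih =>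
      have htokb : tokP arr start b := reach_tok hr
      obtain ⟨hOb, hmem⟩ := hstep
      have hmc : markedP vis c := ((hcl b htokb ih.1 hOb).2) c hmem
      refine ⟨hmc, ?_⟩
      have htokc : tokP arr start c := by
        have hc := (List.mem_filter.mp (by unfold nbF at hmem; exact hmem)).2
        simp only [Bool.and_eq_true, decide_eq_true_eq] at hc
        exact Or.inr hc
      by_cases hOc : okE start arr.length c
      · exact (hcl c htokc hmc hOc).1
      · unfold okE at hOc
        obtain ⟨hneg, hceq⟩ := not_not.mp hOc
        rw [hceq, aF_wrap hs1 hneg]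
        exact ha
  rintro ⟨z, hz, h0⟩
  exact (key z hz).2 h0

-- invariants of the two searches
def invA (arr : List Int) (start : Int) (pos vis : List Int) : Prop :=
  (∀ x ∈ pos, reachR arr start x ∧ tokP arr start x ∧ okE start arr.length x) ∧
  markedP vis start ∧ aF arr start ≠ 0 ∧
  (∀ z, tokP arr start z → markedP vis z → okE start arr.length z →
    aF arr z ≠ 0 ∧ ∀ y ∈ nbF arr z, markedP vis y ∨ y ∈ pos)

def invB (arr : List Int) (start : Int) (stack vis : List Int) : Prop :=
  (∀ x ∈ stack, reachR arr start x ∧ tokP arr start x) ∧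
  markedP vis start ∧ aF arr start ≠ 0 ∧
  (∀ z, tokP arr start z → markedP vis z → okE start arr.length z →
    aF arr z ≠ 0 ∧ ∀ y ∈ nbF arr z, markedP vis y ∨ y ∈ stack)

theorem innerA_true {arr : List Int} {start : Int}
    (hs1 : -(arr.length : Int) ≤ start) (hs2 : start < arr.length) :
    ∀ rev vis next b, innerA arr rev vis next = .inl b →
    (∀ x ∈ rev, reachR arr start x ∧ tokP arr start x) →
    b = true ∧ ansP arr start := by
  intro rev
  induction rev with
  | nil => intro vis next b h _; simp [innerA] at h
  | cons x rest ih =>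
    intro vis next b h hrev
    obtain ⟨hRx, hTx⟩ := hrev x List.mem_cons_self
    have hg : PySem.List.pyGet? arr x = some (aF arr x) := tok_get hs1 hs2 hTx
    rw [innerA, hg] at h
    by_cases hv : aF arr x = 0
    · refine ⟨?_, ⟨x, hRx, hv⟩⟩
      cases b
      · simp [hv] at h
      · rfl
    · simp only [if_neg hv] at h
      exact ih _ _ _ h (fun z hz => ⟨(hrev z (List.mem_cons_of_mem x hz)).1,
        (hrev z (List.mem_cons_of_mem x hz)).2⟩)

theorem innerA_pres {arr : List Int} {start : Int}
    (hs1 : -(arr.length : Int) ≤ start) (hs2 : start < arr.length) :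
    ∀ rev vis next next' vis',
    vis.length = arr.length →
    innerA arr rev vis next = .inr (next', vis') →
    (∀ x ∈ rev, reachR arr start x ∧ tokP arr start x ∧ okE start arr.length x) →
    (∀ y ∈ next, reachR arr start y ∧ tokP arr start y ∧ okE start arr.length y) →
    markedP vis start → aF arr start ≠ 0 →
    (∀ z, tokP arr start z → markedP vis z → okE start arr.length z →
      aF arr z ≠ 0 ∧ ∀ y ∈ nbF arr z, markedP vis y ∨ y ∈ rev ∨ y ∈ next) →
    ((∀ y ∈ next', reachR arr start y ∧ tokP arr start y ∧ okE start arr.length y) ∧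
      markedP vis' start ∧
      (∀ z, tokP arr start z → markedP vis' z → okE start arr.length z →
        aF arr z ≠ 0 ∧ ∀ y ∈ nbF arr z, markedP vis' y ∨ y ∈ next')) := by
  intro rev
  induction rev with
  | nil =>
    intro vis next next' vis' _ h hrev hnext hm ha hcl
    simp only [innerA, Sum.inr.injEq, Prod.mk.injEq] at h
    obtain ⟨h1, h2⟩ := h
    subst h1; subst h2
    refine ⟨hnext, hm, fun z hz hmz hoz => ?_⟩
    obtain ⟨q1, q2⟩ := hcl z hz hmz hoz
    refine ⟨q1, fun y hy => ?_⟩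
    rcases q2 y hy with hc | hc | hc
    · exact Or.inl hc
    · simp at hc
    · exact Or.inr hc
  | cons x rest ih =>
    intro vis next next' vis' hlen h hrev hnext hm ha hcl
    obtain ⟨hRx, hTx, hOx⟩ := hrev x List.mem_cons_self
    have hg : PySem.List.pyGet? arr x = some (aF arr x) := tok_get hs1 hs2 hTx
    rw [innerA, hg] at h
    by_cases hv : aF arr x = 0
    · simp [hv] at h
    · simp only [if_neg hv] at h
      obtain ⟨hxr1, hxr2⟩ := tok_inRange hs1 hs2 hTx
      have hlen1 : (PySem.List.pySetD vis x 1).length = arr.length := by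
        rw [PySem.List.length_pySetD]; exact hlen
      have hm1 : markedP (PySem.List.pySetD vis x 1) start := mark_mono x hm
      have hmx : markedP (PySem.List.pySetD vis x 1) x :=
        mark_self (by rw [hlen]; exact hxr1) (by rw [hlen]; exact hxr2)
      have hF : ∀ y, (y ∈ List.filter
          (fun y => decide (0 ≤ y) && decide (y < (arr.length : Int)) &&
            (PySem.List.pyGetD (PySem.List.pySetD vis x 1) y 0 == 0))
          [x - aF arr x, x + aF arr x]) ↔
          (y ∈ nbF arr x ∧ PySem.List.pyGetD (PySem.List.pySetD vis x 1) y 0 = 0) := by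
        intro y
        simp [nbF, List.mem_filter, and_assoc]
      have hOkF : ∀ y, y ∈ nbF arr x →
          PySem.List.pyGetD (PySem.List.pySetD vis x 1) y 0 = 0 →
          okE start arr.length y := by
        intro y _ hy0 hcon
        obtain ⟨hneg, hyeq⟩ := hcon
        have hw := pyGetD_wrap (PySem.List.pySetD vis x 1) (0 : Int)
          (by rw [hlen1]; exact hs1) hneg
        rw [hlen1] at hw
        unfold markedP at hm1
        rw [hw, ← hyeq] at hm1
        exact hm1 hy0
      have hTF : ∀ y, y ∈ nbF arr x → tokP arr start y := by
        intro y hy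
        have hc := (List.mem_filter.mp hy).2
        simp only [Bool.and_eq_true, decide_eq_true_eq] at hc
        exact Or.inr hc
      refine ih (PySem.List.pySetD vis x 1) _ next' vis' hlen1 h
        (fun z hz => hrev z (List.mem_cons_of_mem x hz)) ?_ hm1 ha ?_
      · -- new pending list: next ++ filtered neighbours of x
        intro y hy
        rcases List.mem_append.mp hy with hy1 | hy1
        · exact hnext y hy1
        · obtain ⟨hnb, hy0⟩ := (hF y).mp hy1
          exact ⟨Relation.ReflTransGen.tail hRx ⟨hOx, hnb⟩, hTF y hnb, hOkF y hnb hy0⟩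
      · -- closure with x now marked
        intro z hTz hmz hOz
        rcases mark_rev hmz with hold | ⟨_, hr2, _, _, heq⟩
        · obtain ⟨q1, q2⟩ := hcl z hTz hold hOz
          refine ⟨q1, fun y hy => ?_⟩
          rcases q2 y hy with hc | hc | hc
          · exact Or.inl (mark_mono x hc)
          · rcases List.mem_cons.mp hc with rfl | hc2
            · exact Or.inl hmx
            · exact Or.inr (Or.inl hc2)
          · exact Or.inr (Or.inr (List.mem_append_left _ hc))
        · have heq' : nIdxN arr.length z = nIdxN arr.length x := by
            rw [← hlen]; exact heq
          rcases partner_cases hs1 hs2 hTx hTz heq' with rfl | ⟨hneg, hpc⟩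
          · refine ⟨hv, fun y hy => ?_⟩
            by_cases hy0 : PySem.List.pyGetD (PySem.List.pySetD vis z 1) y 0 = 0
            · exact Or.inr (Or.inr (List.mem_append_right _ ((hF y).mpr ⟨hy, hy0⟩)))
            · exact Or.inl hy0
          · rcases hpc with ⟨hz1, hx1⟩ | ⟨hz1, hx1⟩
            · exact absurd ⟨hneg, hx1⟩ hOx
            · exact absurd ⟨hneg, hz1⟩ hOz

theorem outerA_iff {arr : List Int} {start : Int}
    (hs1 : -(arr.length : Int) ≤ start) (hs2 : start < arr.length) :
    ∀ pos (vis : {v : List Int // v.length = arr.length}), invA arr start pos vis.1 →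
    (outerA arr pos vis = true ↔ ansP arr start) := by
  intro pos vis
  induction pos, vis using outerA.induct arr with
  | case1 pos vis hp =>
    intro hinv
    obtain ⟨hpos, hm, ha, hcl⟩ := hinv
    rw [outerA, dif_pos hp]
    simp only [Bool.false_eq_true, false_iff]
    refine closed_noAns vis.1 hs1 hs2 vis.2 hm ha ?_
    intro z hz hmz hoz
    obtain ⟨q1, q2⟩ := hcl z hz hmz hoz
    refine ⟨q1, fun y hy => ?_⟩
    rcases q2 y hy with hc | hc
    · exact hc
    · rw [List.isEmpty_iff.mp hp] at hc; simp at hc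
  | case2 pos vis hp b hinl =>
    intro hinv
    obtain ⟨hpos, hm, ha, hcl⟩ := hinv
    rw [outerA, dif_neg hp]
    obtain ⟨hb, hans⟩ := innerA_true hs1 hs2 pos.reverse vis.1 [] b hinl
      (fun z hz => ⟨(hpos z (List.mem_reverse.mp hz)).1, (hpos z (List.mem_reverse.mp hz)).2.1⟩)
    split
    · next b' heq =>
      rw [hinl] at heq
      injection heq with heq
      subst heq
      simp only [hb, true_iff]
      exact hans
    · next n' v' heq => rw [hinl] at heq; simp at heq
  | case3 pos vis hp next vis' hinr ih =>
    intro hinv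
    obtain ⟨hpos, hm, ha, hcl⟩ := hinv
    have hpres := innerA_pres hs1 hs2 pos.reverse vis.1 [] next vis' vis.2 hinr
      (fun z hz => hpos z (List.mem_reverse.mp hz))
      (fun y hy => absurd hy (List.not_mem_nil))
      hm ha
      (fun z hz hmz hoz => by
        obtain ⟨q1, q2⟩ := hcl z hz hmz hoz
        refine ⟨q1, fun y hy => ?_⟩
        rcases q2 y hy with hc | hc
        · exact Or.inl hc
        · exact Or.inr (Or.inl (List.mem_reverse.mpr hc)))
    obtain ⟨hnext', hm', hcl'⟩ := hpres
    rw [outerA, dif_neg hp]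
    split
    · next b' heq => rw [hinr] at heq; simp at heq
    · next n' v' heq =>
      rw [hinr] at heq
      injection heq with heq
      injection heq with heq1 heq2
      subst heq1; subst heq2
      exact ih ⟨hnext', hm', ha, hcl'⟩

theorem pvMemLast {α : Type} (l : List α) (x : α) (h : l.getLast? = some x)
    (y : α) (hy : y ∈ l) : y ∈ l.dropLast ∨ y = x := by
  have hne : l ≠ [] := by intro hnil; rw [hnil] at h; simp at h
  have hdg := List.dropLast_append_getLast hne
  have hgl : l.getLast hne = x := by
    have h2 := List.getLast?_eq_some_getLast (l := l) hne
    rw [h2] at h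
    injection h
  rw [← hdg] at hy
  rcases List.mem_append.mp hy with h1 | h1
  · exact Or.inl h1
  · simp at h1; right; rw [← hgl]; exact h1

theorem loopB_iff {arr : List Int} {start : Int}
    (hs1 : -(arr.length : Int) ≤ start) (hs2 : start < arr.length) :
    ∀ stack (vis : {v : List Int // v.length = arr.length}), invB arr start stack vis.1 →
    (loopB arr stack vis = true ↔ ansP arr start) := by
  intro stack vis
  induction stack, vis using loopB.induct arr with
  | case1 stack vis hx =>
    intro hinv
    obtain ⟨hst, hm, ha, hcl⟩ := hinv
    rw [loopB]
    split
    · simp only [Bool.false_eq_true, false_iff]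
      refine closed_noAns vis.1 hs1 hs2 vis.2 hm ha ?_
      intro z hz hmz hoz
      obtain ⟨q1, q2⟩ := hcl z hz hmz hoz
      refine ⟨q1, fun y hy => ?_⟩
      rcases q2 y hy with hc | hc
      · exact hc
      · rw [List.getLast?_eq_none_iff.mp hx] at hc; simp at hc
    · next x heq => rw [hx] at heq; simp at heq
  | case2 stack vis x hx hnone =>
    intro hinv
    obtain ⟨hst, hm, ha, hcl⟩ := hinv
    exfalso
    have htok : tokP arr start x := (hst x (List.mem_of_getLast? hx)).2
    rw [tok_get hs1 hs2 htok] at hnone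
    simp at hnone
  | case3 stack vis x hx hzero =>
    intro hinv
    obtain ⟨hst, hm, ha, hcl⟩ := hinv
    have htok : tokP arr start x := (hst x (List.mem_of_getLast? hx)).2
    have ha0 : aF arr x = 0 := by
      rw [tok_get hs1 hs2 htok] at hzero
      injection hzero
    rw [loopB]
    split
    · next heq => rw [hx] at heq; simp at heq
    · next x' heq =>
      rw [hx] at heq
      injection heq with heq; subst heq
      rw [hzero]
      simp only [reduceIte, true_iff]
      exact ⟨x, (hst x (List.mem_of_getLast? hx)).1, ha0⟩
  | case4 stack vis x hx v hv hvne hmarked ih =>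
    intro hinv
    obtain ⟨hst, hm, ha, hcl⟩ := hinv
    rw [loopB]
    split
    · next heq => rw [hx] at heq; simp at heq
    · next x' heq =>
      rw [hx] at heq; injection heq with heq; subst heq
      rw [hv]
      simp only [if_neg hvne, dif_pos hmarked]
      refine ih ⟨fun z hz => hst z ((List.dropLast_sublist stack).subset hz), hm, ha, ?_⟩
      intro z hz hmz hoz
      obtain ⟨q1, q2⟩ := hcl z hz hmz hoz
      refine ⟨q1, fun y hy => ?_⟩
      rcases q2 y hy with hc | hc
      · exact Or.inl hc
      · rcases pvMemLast stack x hx y hc with h1 | h1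
        · exact Or.inr h1
        · exact Or.inl (by rw [h1]; exact hmarked)
  | case5 stack vis x hx v hv hvne hunm ih =>
    intro hinv
    obtain ⟨hst, hm, ha, hcl⟩ := hinv
    obtain ⟨hRx, hTx⟩ := hst x (List.mem_of_getLast? hx)
    have hg : PySem.List.pyGet? arr x = some (aF arr x) := tok_get hs1 hs2 hTx
    have hveq : v = aF arr x := by
      have := hv.symm.trans hg
      injection this
    have hx0 : PySem.List.pyGetD vis.1 x 0 = 0 := not_not.mp hunm
    have hOx : okE start arr.length x := by
      rintro ⟨hneg, hxeq⟩
      have hw := pyGetD_wrap vis.1 (0 : Int) (by rw [vis.2]; exact hs1) hneg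
      rw [vis.2] at hw
      unfold markedP at hm
      rw [hw, ← hxeq] at hm
      exact hm hx0
    obtain ⟨hxr1, hxr2⟩ := tok_inRange hs1 hs2 hTx
    have hm1 : markedP (PySem.List.pySetD vis.1 x 1) start := mark_mono x hm
    have hmx : markedP (PySem.List.pySetD vis.1 x 1) x :=
      mark_self (by rw [vis.2]; exact hxr1) (by rw [vis.2]; exact hxr2)
    have hpush : List.filter (fun y => decide (0 ≤ y) && decide (y < (arr.length : Int)))
        [x - v, x + v] = nbF arr x := by
      rw [hveq]; rfl
    rw [loopB]
    split
    · next heq => rw [hx] at heq; simp at heq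
    · next x' heq =>
      rw [hx] at heq; injection heq with heq; subst heq
      rw [hv]
      simp only [if_neg hvne, dif_neg hunm]
      refine ih ?_
      refine ⟨?_, hm1, ha, ?_⟩
      · intro y hy
        rcases List.mem_append.mp hy with h1 | h1
        · exact hst y ((List.dropLast_sublist stack).subset h1)
        · rw [hpush] at h1
          refine ⟨Relation.ReflTransGen.tail hRx ⟨hOx, h1⟩, ?_⟩
          have hc := (List.mem_filter.mp h1).2
          simp only [Bool.and_eq_true, decide_eq_true_eq] at hc
          exact Or.inr hc
      · intro z hTz hmz hoz
        rcases mark_rev hmz with hold | ⟨_, _, _, _, heqI⟩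
        · obtain ⟨q1, q2⟩ := hcl z hTz hold hoz
          refine ⟨q1, fun y hy => ?_⟩
          rcases q2 y hy with hc | hc
          · exact Or.inl (mark_mono x hc)
          · rcases pvMemLast stack x hx y hc with h1 | h1
            · exact Or.inr (List.mem_append_left _ h1)
            · exact Or.inl (by rw [h1]; exact hmx)
        · have heqI' : nIdxN arr.length z = nIdxN arr.length x := by
            rw [← vis.2]; exact heqI
          rcases partner_cases hs1 hs2 hTx hTz heqI' with rfl | ⟨hneg, hpc⟩
          · refine ⟨by rw [← hveq]; exact hvne, fun y hy => ?_⟩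
            exact Or.inr (List.mem_append_right _ (by rw [hpush]; exact hy))
          · rcases hpc with ⟨hz1, hx1⟩ | ⟨hz1, hx1⟩
            · exact absurd ⟨hneg, hx1⟩ hOx
            · exact absurd ⟨hneg, hz1⟩ hoz

theorem outerA_inl_eq (arr pos visl : List Int) (hlen : visl.length = arr.length)
    (b : Bool) (hp : ¬ pos.isEmpty = true)
    (h : innerA arr pos.reverse visl [] = Sum.inl b) :
    outerA arr pos ⟨visl, hlen⟩ = b := by
  rw [outerA, dif_neg hp]
  split
  · next b' heq => rw [h] at heq; injection heq with heq; rw [heq]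
  · next n' v' heq => rw [h] at heq; simp at heq

theorem outerA_inr_eq (arr pos visl : List Int) (hlen0 : visl.length = arr.length)
    (next vis' : List Int) (hp : ¬ pos.isEmpty = true)
    (h : innerA arr pos.reverse visl [] = Sum.inr (next, vis'))
    (hlen : vis'.length = arr.length) :
    outerA arr pos ⟨visl, hlen0⟩ = outerA arr next ⟨vis', hlen⟩ := by
  rw [outerA, dif_neg hp]
  split
  · next b' heq => rw [h] at heq; simp at heq
  · next n' v' heq =>
    rw [h] at heq
    injection heq with heq
    injection heq with h1 h2
    subst h1; subst h2
    rfl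

theorem loopB_zero_eq (arr stack visl : List Int) (hlen : visl.length = arr.length)
    (x : Int) (hx : stack.getLast? = some x)
    (hv : PySem.List.pyGet? arr x = some 0) : loopB arr stack ⟨visl, hlen⟩ = true := by
  rw [loopB]
  split
  · next heq => rw [hx] at heq; simp at heq
  · next x' heq =>
    rw [hx] at heq; injection heq with heq; subst heq
    rw [hv]
    split
    · next heq2 => simp at heq2
    · next v' heq2 =>
      injection heq2 with heq2
      subst heq2
      rw [if_pos rfl]

theorem loopB_push_eq (arr stack visl : List Int) (hlen : visl.length = arr.length)
    (x v : Int) (hx : stack.getLast? = some x)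
    (hv : PySem.List.pyGet? arr x = some v) (hvne : ¬ v = 0)
    (hunm : ¬ PySem.List.pyGetD visl x 0 ≠ 0) :
    loopB arr stack ⟨visl, hlen⟩ = loopB arr
      (stack.dropLast ++ List.filter
        (fun y => decide (0 ≤ y) && decide (y < (arr.length : Int))) [x - v, x + v])
      ⟨PySem.List.pySetD visl x 1, by rw [PySem.List.length_pySetD]; exact hlen⟩ := by
  rw [loopB]
  split
  · next heq => rw [hx] at heq; simp at heq
  · next x' heq =>
    rw [hx] at heq; injection heq with heq; subst heq
    rw [hv]
    split
    · next heq2 => simp at heq2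
    · next v' heq2 =>
      injection heq2 with heq2
      subst heq2
      rw [if_neg hvne, dif_neg hunm]

theorem filter_mem_iff (arr vis1 : List Int) (x y : Int) :
    (y ∈ List.filter
      (fun y => decide (0 ≤ y) && decide (y < (arr.length : Int)) &&
        (PySem.List.pyGetD vis1 y 0 == 0)) [x - aF arr x, x + aF arr x]) ↔
    (y ∈ nbF arr x ∧ PySem.List.pyGetD vis1 y 0 = 0) := by
  simp [nbF, List.mem_filter, and_assoc]

theorem portA_iff {arr : List Int} {start : Int}
    (hs1 : -(arr.length : Int) ≤ start) (hs2 : start < arr.length) :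
    (solution_858_3 arr start = true ↔ ansP arr start) := by
  have hTs : tokP arr start start := Or.inl rfl
  have hg := tok_get hs1 hs2 hTs
  have hn : 0 < arr.length := by omega
  have hrev : ([start] : List Int).reverse = [start] := by simp
  have hlen0 : (List.replicate arr.length (0 : Int)).length = arr.length := by simp
  unfold solution_858_3
  by_cases ha0 : aF arr start = 0
  · have hinl : innerA arr [start].reverse (List.replicate arr.length 0) [] =
        Sum.inl true := by
      rw [hrev, innerA]
      simp only [hg]
      rw [if_pos ha0]
    rw [outerA_inl_eq arr [start] _ hlen0 true (by simp) hinl]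
    simp only [true_iff]
    exact ⟨start, Relation.ReflTransGen.refl, ha0⟩
  · have hstep : innerA arr [start].reverse (List.replicate arr.length 0) [] =
        Sum.inr (List.filter
          (fun y => decide (0 ≤ y) && decide (y < (arr.length : Int)) &&
            (PySem.List.pyGetD
              (PySem.List.pySetD (List.replicate arr.length (0 : Int)) start 1) y 0 == 0))
          [start - aF arr start, start + aF arr start],
          PySem.List.pySetD (List.replicate arr.length (0 : Int)) start 1) := by
      rw [hrev, innerA]
      simp only [hg]
      rw [if_neg ha0, innerA]
      simp only [List.nil_append]
    have hlen1 : (PySem.List.pySetD (List.replicate arr.length (0 : Int)) start 1).length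
        = arr.length := by rw [PySem.List.length_pySetD]; simp
    have hm1 : markedP (PySem.List.pySetD (List.replicate arr.length 0) start 1) start :=
      mark_self (by rw [hlen0]; exact hs1) (by rw [hlen0]; exact hs2)
    have okS : okE start arr.length start := by rintro ⟨hneg, heq⟩; omega
    rw [outerA_inr_eq arr [start] _ hlen0 _ _ (by simp) hstep hlen1]
    apply outerA_iff hs1 hs2
    refine ⟨?_, hm1, ha0, ?_⟩
    · intro y hy
      obtain ⟨hnb, hy0⟩ := (filter_mem_iff arr _ start y).mp hy
      have hc := (List.mem_filter.mp hnb).2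
      simp only [Bool.and_eq_true, decide_eq_true_eq] at hc
      refine ⟨Relation.ReflTransGen.tail Relation.ReflTransGen.refl ⟨okS, hnb⟩,
        Or.inr hc, ?_⟩
      rintro ⟨hneg, hyeq⟩
      have hw := pyGetD_wrap (PySem.List.pySetD (List.replicate arr.length 0) start 1)
        (0 : Int) (by rw [hlen1]; exact hs1) hneg
      rw [hlen1] at hw
      unfold markedP at hm1
      rw [hw, ← hyeq] at hm1
      exact hm1 hy0
    · intro z hTz hmz hoz
      rcases mark_rev hmz with hold | ⟨_, _, _, _, heqI⟩
      · exact absurd hold marked_replicate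
      · have heqI' : nIdxN arr.length z = nIdxN arr.length start := by
          rw [← hlen0]; exact heqI
        rcases partner_cases hs1 hs2 hTs hTz heqI' with rfl | ⟨hneg, hpc⟩
        · refine ⟨ha0, fun y hy => ?_⟩
          by_cases hy0 : PySem.List.pyGetD
              (PySem.List.pySetD (List.replicate arr.length (0 : Int)) z 1) y 0 = 0
          · exact Or.inr ((filter_mem_iff arr _ z y).mpr ⟨hy, hy0⟩)
          · exact Or.inl hy0
        · rcases hpc with ⟨hz1, hx1⟩ | ⟨hz1, hx1⟩
          · omega
          · exact absurd ⟨hneg, hz1⟩ hoz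

theorem portB_iff {arr : List Int} {start : Int}
    (hs1 : -(arr.length : Int) ≤ start) (hs2 : start < arr.length) :
    (solution_858_3_alt arr start = true ↔ ansP arr start) := by
  have hTs : tokP arr start start := Or.inl rfl
  have hg := tok_get hs1 hs2 hTs
  have hn : 0 < arr.length := by omega
  have hlen0 : (List.replicate arr.length (0 : Int)).length = arr.length := by simp
  have okS : okE start arr.length start := by rintro ⟨hneg, heq⟩; omega
  unfold solution_858_3_alt
  by_cases ha0 : aF arr start = 0
  · rw [loopB_zero_eq arr [start] _ hlen0 start (by simp) (by rw [hg, ha0])]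
    simp only [true_iff]
    exact ⟨start, Relation.ReflTransGen.refl, ha0⟩
  · have h0 : ¬ PySem.List.pyGetD (List.replicate arr.length (0 : Int)) start 0 ≠ 0 :=
      marked_replicate
    rw [loopB_push_eq arr [start] _ hlen0 start (aF arr start) (by simp) hg ha0 h0]
    have hm1 : markedP (PySem.List.pySetD (List.replicate arr.length 0) start 1) start :=
      mark_self (by rw [hlen0]; exact hs1) (by rw [hlen0]; exact hs2)
    apply loopB_iff hs1 hs2
    refine ⟨?_, hm1, ha0, ?_⟩
    · intro y hy
      rcases List.mem_append.mp hy with h1 | h1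
      · simp at h1
      · have hc := (List.mem_filter.mp h1).2
        simp only [Bool.and_eq_true, decide_eq_true_eq] at hc
        exact ⟨Relation.ReflTransGen.tail Relation.ReflTransGen.refl ⟨okS, h1⟩,
          Or.inr hc⟩
    · intro z hTz hmz hoz
      rcases mark_rev hmz with hold | ⟨_, _, _, _, heqI⟩
      · exact absurd hold marked_replicate
      · have heqI' : nIdxN arr.length z = nIdxN arr.length start := by
          rw [← hlen0]; exact heqI
        rcases partner_cases hs1 hs2 hTs hTz heqI' with rfl | ⟨hneg, hpc⟩
        · exact ⟨ha0, fun y hy => Or.inr (List.mem_append_right _ hy)⟩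
        · rcases hpc with ⟨hz1, hx1⟩ | ⟨hz1, hx1⟩
          · omega
          · exact absurd ⟨hneg, hz1⟩ hoz

-- ===== VERDICT (by name: the statement is the Claim_ definition above) =====
theorem solution_858_3_spec : Claim_equal_solution_858_3 := by
  intro arr start _hdom hpre
  obtain ⟨hs1, hs2⟩ := hpre
  unfold Spec_solution_858_3
  rw [Bool.eq_iff_iff, portA_iff hs1 hs2, portB_iff hs1 hs2]
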